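-- pv_equiv track=rewrite | github.com/goodfeeling1337-create/BD-check | app/core/checks/task7.py | build_chains_partial
-- ===== SOURCE A (Python) =====
-- def build_chains_partial(P_ref: list[tuple[list[str], str]]) -> list[list[tuple[list[str], str]]]:
--     """Group by RHS A, order by LHS inclusion (larger first)."""
--     by_rhs: dict[str, list[tuple[list[str], str]]] = {}
--     for lhs, rhs in P_ref:
--         by_rhs.setdefault(rhs, []).append((lhs, rhs))
--     chains = []
--     for rhs, fds in by_rhs.items():
--         sorted_fds = sorted(fds, key=lambda x: -len(x[0]))
--         chains.append(sorted_fds)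
--     return chains
-- ===== SOURCE B (Python) =====
-- def build_chains_partial(P_ref: list[tuple[list[str], str]]) -> list[list[tuple[list[str], str]]]:
--     """Group by RHS A, order by LHS inclusion (larger first)."""
--     order = list(dict.fromkeys(rhs for _, rhs in P_ref))
--     return [
--         sorted([fd for fd in P_ref if fd[1] == r], key=lambda x: -len(x[0]))
--         for r in order
--     ]
-- ===== Notes on version B (the rewrite author's own statement) =====
-- stated objective: simpler
-- what changed: Replaces the mutable dict-of-lists accumulation with a dedup of the RHS values in first-appearance order followed by one filter comprehension per distinct RHS; no dict is built.
import Mathlib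
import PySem

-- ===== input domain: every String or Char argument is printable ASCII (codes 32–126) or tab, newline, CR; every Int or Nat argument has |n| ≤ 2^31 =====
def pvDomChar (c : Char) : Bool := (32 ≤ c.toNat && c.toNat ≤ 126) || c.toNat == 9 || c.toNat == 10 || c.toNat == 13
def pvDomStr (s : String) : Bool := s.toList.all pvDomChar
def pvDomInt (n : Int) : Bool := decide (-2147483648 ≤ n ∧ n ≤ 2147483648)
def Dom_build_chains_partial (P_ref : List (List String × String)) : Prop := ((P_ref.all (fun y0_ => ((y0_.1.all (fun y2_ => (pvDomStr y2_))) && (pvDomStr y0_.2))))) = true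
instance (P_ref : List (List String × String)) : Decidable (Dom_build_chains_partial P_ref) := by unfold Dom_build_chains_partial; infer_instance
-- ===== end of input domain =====

-- B replaces A's dict-of-lists accumulation by a dedup of the RHS values plus one filter per distinct RHS (simpler decomposition, no dict).

-- ===== PORT A =====
def build_chains_partial (P_ref : List (List String × String)) : List (List (List String × String)) :=
  let by_rhs : PySem.Dict String (List (List String × String)) :=
    P_ref.foldl (fun d fd => d.insert fd.2 (d.getD fd.2 [] ++ [(fd.1, fd.2)])) ⟨[]⟩
  by_rhs.items.foldl
    (fun chains kv => chains ++ [PySem.List.sorted kv.2 (fun x => -(x.1.length : Int)) false]) []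

-- ===== PORT B =====
def build_chains_partial_alt (P_ref : List (List String × String)) : List (List (List String × String)) :=
  let order := PySem.List.dedup (P_ref.map (fun fd => fd.2))
  order.map (fun r =>
    PySem.List.sorted (P_ref.filter (fun fd => fd.2 == r)) (fun x => -(x.1.length : Int)) false)

-- ===== PRECONDITION & SPEC =====
def Spec_build_chains_partial (P_ref : List (List String × String)) (out : List (List (List String × String))) : Prop := out = build_chains_partial_alt P_ref
instance (P_ref : List (List String × String)) (out : List (List (List String × String))) : Decidable (Spec_build_chains_partial P_ref out) := by unfold Spec_build_chains_partial; infer_instance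

-- ===== CLAIM (what is proved, stated in full; the proofs are below) =====
def Claim_equal_build_chains_partial : Prop := ∀ (P_ref : List (List String × String)), Dom_build_chains_partial P_ref → Spec_build_chains_partial P_ref (build_chains_partial P_ref)

-- ===== LEMMAS AND PROOFS =====

-- find? with an equality test returns the sought element when it is present.
theorem find?_beq_self {ks : List String} {a : String} (h : a ∈ ks) :
    ks.find? (fun r => r == a) = some a := by
  induction ks with
  | nil => cases h
  | cons b t ih =>
    by_cases hb : b = a
    · simp [hb]
    · have : a ∈ t := by cases h with
        | head => exact absurd rfl hb
        | tail _ h' => exact h'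
      simp [hb, ih this]

-- A's grouping loop, run from a dict whose items are `ks.map (fun r => (r, g r))` with distinct
-- keys (and g vanishing off ks), extends the key list by the new RHS values in first-appearance
-- order and extends each key's value by all of P's entries with that RHS.
theorem foldl_group_eq (P : List (List String × String)) :
    ∀ (ks : List String) (g : String → List (List String × String)),
      ks.Nodup → (∀ r, r ∉ ks → g r = []) →
      (P.foldl (fun d fd => d.insert fd.2 (d.getD fd.2 [] ++ [(fd.1, fd.2)]))
        (⟨ks.map (fun r => (r, g r))⟩ : PySem.Dict String (List (List String × String))))
      = ⟨((P.map (fun fd => fd.2)).foldl PySem.Set.add ks).map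
           (fun r => (r, g r ++ P.filter (fun fd => fd.2 == r)))⟩ := by
  induction P with
  | nil => intro ks g _ _; simp
  | cons fd t ih =>
    intro ks g hnd hg
    simp only [List.foldl_cons, List.map_cons]
    by_cases hk : fd.2 ∈ ks
    · have hcont : (⟨ks.map (fun r => (r, g r))⟩ :
          PySem.Dict String (List (List String × String))).contains fd.2 = true := by
        simp only [PySem.Dict.contains, List.any_map, List.any_eq_true, Function.comp]
        exact ⟨fd.2, hk, by simp⟩
      have hget : (⟨ks.map (fun r => (r, g r))⟩ :
          PySem.Dict String (List (List String × String))).getD fd.2 [] = g fd.2 := by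
        simp only [PySem.Dict.getD, PySem.Dict.get?, List.find?_map]
        simp [Function.comp_def, find?_beq_self hk]
      have hins : ((⟨ks.map (fun r => (r, g r))⟩ :
            PySem.Dict String (List (List String × String))).insert fd.2
              ((⟨ks.map (fun r => (r, g r))⟩ :
            PySem.Dict String (List (List String × String))).getD fd.2 [] ++ [(fd.1, fd.2)]))
          = ⟨ks.map (fun r => (r, if r = fd.2 then g fd.2 ++ [(fd.1, fd.2)] else g r))⟩ := by
        simp only [PySem.Dict.insert, hcont, if_pos, hget, List.map_map]
        congr 1
        refine List.map_congr_left ?_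
        intro r _
        by_cases hr : r = fd.2 <;> simp [Function.comp, hr]
      have hg' : ∀ r, r ∉ ks →
          (if r = fd.2 then g fd.2 ++ [(fd.1, fd.2)] else g r) = [] := by
        intro r hr
        have hne : r ≠ fd.2 := fun h => hr (h ▸ hk)
        simp [hne, hg r hr]
      rw [hins, ih ks _ hnd hg']
      have hadd : PySem.Set.add ks fd.2 = ks := by
        simp [PySem.Set.add, PySem.Set.contains, hk]
      rw [hadd]
      congr 1
      refine List.map_congr_left ?_
      intro r _
      by_cases hr : r = fd.2
      · subst hr
        simp
      · have : (fd.2 == r) = false := beq_eq_false_iff_ne.mpr (Ne.symm hr)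
        simp [this, hr]
    · have hcont : (⟨ks.map (fun r => (r, g r))⟩ :
          PySem.Dict String (List (List String × String))).contains fd.2 = false := by
        simp only [PySem.Dict.contains, List.any_map, List.any_eq_false, Function.comp]
        intro r hr
        exact fun h => hk ((beq_iff_eq.mp h) ▸ hr)
      have hget : (⟨ks.map (fun r => (r, g r))⟩ :
          PySem.Dict String (List (List String × String))).getD fd.2 [] = [] := by
        simp only [PySem.Dict.getD, PySem.Dict.get?, List.find?_map]
        have : ks.find? (fun r => r == fd.2) = none := by
          rw [List.find?_eq_none]
          intro r hr
          exact fun h => hk ((beq_iff_eq.mp h) ▸ hr)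
        simp [Function.comp_def, this]
      have hins : ((⟨ks.map (fun r => (r, g r))⟩ :
            PySem.Dict String (List (List String × String))).insert fd.2
              ((⟨ks.map (fun r => (r, g r))⟩ :
            PySem.Dict String (List (List String × String))).getD fd.2 [] ++ [(fd.1, fd.2)]))
          = ⟨(ks ++ [fd.2]).map
              (fun r => (r, if r = fd.2 then [(fd.1, fd.2)] else g r))⟩ := by
        simp only [PySem.Dict.insert, hcont, Bool.false_eq_true, if_false, hget,
          List.nil_append, List.map_append, List.map_cons, List.map_nil]
        have h1 : List.map (fun r => (r, g r)) ks
            = List.map (fun r : String => (r, if r = fd.2 then [(fd.1, fd.2)] else g r)) ks := by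
          refine List.map_congr_left ?_
          intro r hr
          have hne : r ≠ fd.2 := fun h => hk (h ▸ hr)
          simp [hne]
        rw [h1]
        simp
      have hnd' : (ks ++ [fd.2]).Nodup := by
        rw [List.nodup_append]
        refine ⟨hnd, List.nodup_singleton _, ?_⟩
        intro a ha b hb
        simp only [List.mem_singleton] at hb
        subst hb
        exact fun h => hk (h ▸ ha)
      have hg' : ∀ r, r ∉ ks ++ [fd.2] →
          (if r = fd.2 then [(fd.1, fd.2)] else g r) = [] := by
        intro r hr
        simp only [List.mem_append, List.mem_singleton, not_or] at hr
        simp [hr.2, hg r hr.1]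
      rw [hins, ih (ks ++ [fd.2]) _ hnd' hg']
      have hadd : PySem.Set.add ks fd.2 = ks ++ [fd.2] := by
        simp [PySem.Set.add, PySem.Set.contains, hk]
      rw [hadd]
      congr 1
      refine List.map_congr_left ?_
      intro r _
      by_cases hr : r = fd.2
      · subst hr
        simp [hg _ hk]
      · have : (fd.2 == r) = false := beq_eq_false_iff_ne.mpr (Ne.symm hr)
        simp [this, hr]

-- ===== VERDICT (by name: the statement is the Claim_ definition above) =====
theorem build_chains_partial_spec : Claim_equal_build_chains_partial := by
  intro P _
  unfold Spec_build_chains_partial build_chains_partial build_chains_partial_alt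
  have h0 : (⟨[]⟩ : PySem.Dict String (List (List String × String)))
      = ⟨([] : List String).map (fun r => (r, (fun _ => []) r))⟩ := rfl
  rw [h0, foldl_group_eq P [] (fun _ => []) List.nodup_nil (fun _ _ => rfl)]
  rw [PySem.List.foldl_append_singleton_eq_map
    (f := fun kv : String × List (List String × String) =>
      PySem.List.sorted kv.2 (fun x => -(x.1.length : Int)) false)]
  simp [PySem.List.dedup, PySem.Set.ofList_eq_foldl, List.map_map, Function.comp]
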